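-- pv_equiv track=rewrite | github.com/ajinabraham123/SMPL_Automation_Test | Spyder_Robo_Streamlit.py | prioritize_orders
-- ===== SOURCE A (Python) =====
-- from queue import PriorityQueue
--
-- def prioritize_orders(orders):
--     """
--     Prioritize orders based on urgency or fragility.
--
--     Args:
--         orders (list): List of orders with attributes like (location, priority).
--
--     Returns:
--         list: Prioritized list of orders.
--     """
--     pq = PriorityQueue()
--     for order in orders:
--         location, priority = order
--         pq.put((priority, location))  # Lower priority value indicates higher urgency
--
--     # Extract orders in priority order
--     prioritized_orders = []
--     while not pq.empty():
--         _, location = pq.get()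
--         prioritized_orders.append(location)
--
--     return prioritized_orders
-- ===== SOURCE B (Python) =====
-- def prioritize_orders(orders):
--     """
--     Prioritize orders based on urgency or fragility.
--
--     Same result as the PriorityQueue version, computed by a single sort:
--     build the (priority, location) key tuples, sort them once (full-tuple
--     lexicographic order, matching the heap's total order), then project
--     the locations.
--     """
--     keyed = []
--     for order in orders:
--         location, priority = order
--         keyed.append((priority, location))
--     keyed.sort()
--     return [location for _, location in keyed]
-- ===== Notes on version B (the rewrite author's own statement) =====
-- stated objective: simpler
-- what changed: Replaces the PriorityQueue build-then-drain loop with a single sort of the (priority, location) tuples followed by a projection of the locations.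
import Mathlib
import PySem

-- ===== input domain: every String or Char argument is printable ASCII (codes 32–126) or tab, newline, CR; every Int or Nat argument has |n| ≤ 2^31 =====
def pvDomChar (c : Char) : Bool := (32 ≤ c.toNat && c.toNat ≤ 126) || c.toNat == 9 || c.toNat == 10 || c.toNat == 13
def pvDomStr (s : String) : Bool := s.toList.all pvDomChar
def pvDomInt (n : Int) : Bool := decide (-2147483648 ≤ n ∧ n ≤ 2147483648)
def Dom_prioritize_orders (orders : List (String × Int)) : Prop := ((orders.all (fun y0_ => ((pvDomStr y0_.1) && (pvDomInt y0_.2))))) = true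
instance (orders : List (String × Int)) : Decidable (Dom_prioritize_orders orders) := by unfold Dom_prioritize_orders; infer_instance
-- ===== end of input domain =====

-- B replaces A's priority-queue build/drain loops with one sort of the
-- (priority, location) tuples plus a projection — simpler, same cost.

-- ===== PORT A =====
-- The PriorityQueue is modelled as a plain list; `get` extracts a minimal
-- element under the full-tuple lexicographic order (Python compares the
-- whole (priority, location) tuples), exactly the heap's pop order.
def pvLexLt (x y : Int × String) : Bool := decide (toLex x < toLex y)

-- running minimum over the queue (ties keep the earlier element; tied
-- tuples are identical values, so the choice is immaterial)
def pvQMin (a : Int × String) (l : List (Int × String)) : Int × String :=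
  l.foldl (fun m x => if pvLexLt x m then x else m) a

-- needed by pvDrain's termination proof
theorem pvQMin_mem (a : Int × String) (l : List (Int × String)) :
    pvQMin a l = a ∨ pvQMin a l ∈ l := by
  induction l generalizing a with
  | nil => exact Or.inl rfl
  | cons h t ih =>
    simp only [pvQMin, List.foldl_cons] at *
    by_cases hlt : pvLexLt h a = true
    · simp only [hlt, if_pos]
      rcases ih h with h1 | h2
      · exact Or.inr (by simp [h1])
      · exact Or.inr (List.mem_cons_of_mem _ h2)
    · simp only [Bool.not_eq_true] at hlt
      simp only [hlt, Bool.false_eq_true, if_neg, not_false_iff]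
      rcases ih a with h1 | h2
      · exact Or.inl h1
      · exact Or.inr (List.mem_cons_of_mem _ h2)

-- also needed by pvDrain's termination proof
theorem pvQMin_mem_cons (h : Int × String) (t : List (Int × String)) :
    pvQMin h t ∈ h :: t := by
  rcases pvQMin_mem h t with h1 | h2
  · simp [h1]
  · exact List.mem_cons_of_mem _ h2

-- the drain loop: while not pq.empty(): _, location = pq.get(); append
def pvDrain : List (Int × String) → List String
  | [] => []
  | h :: t =>
    let m := pvQMin h t
    m.2 :: pvDrain ((h :: t).erase m)
termination_by l => l.length
decreasing_by
  rw [List.length_erase_of_mem (pvQMin_mem_cons h t)]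
  simp

def prioritize_orders (orders : List (String × Int)) : List String :=
  pvDrain (orders.foldl (fun pq o => pq ++ [(o.2, o.1)]) [])

-- ===== PORT B =====
def prioritize_orders_alt (orders : List (String × Int)) : List String :=
  let keyed := orders.foldl (fun acc o => acc ++ [(o.2, o.1)]) []
  (PySem.List.sorted2 keyed (fun t => t.1) (fun t => t.2)).map (fun t => t.2)

-- ===== PRECONDITION & SPEC =====
def Spec_prioritize_orders (orders : List (String × Int)) (out : List String) : Prop := out = prioritize_orders_alt orders
instance (orders : List (String × Int)) (out : List String) : Decidable (Spec_prioritize_orders orders out) := by unfold Spec_prioritize_orders; infer_instance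

-- ===== CLAIM (what is proved, stated in full; the proofs are below) =====
def Claim_equal_prioritize_orders : Prop := ∀ (orders : List (String × Int)), Dom_prioritize_orders orders → Spec_prioritize_orders orders (prioritize_orders orders)

-- ===== LEMMAS AND PROOFS =====

-- tuple-level image of the drain loop (proof-only helper)
def pvExtract : List (Int × String) → List (Int × String)
  | [] => []
  | h :: t =>
    let m := pvQMin h t
    m :: pvExtract ((h :: t).erase m)
termination_by l => l.length
decreasing_by
  rw [List.length_erase_of_mem (pvQMin_mem_cons h t)]
  simp

theorem pvDrain_eq_map (l : List (Int × String)) :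
    pvDrain l = (pvExtract l).map Prod.snd := by
  induction l using pvExtract.induct with
  | case1 => simp [pvDrain, pvExtract]
  | case2 h t m ih =>
    rw [pvDrain, pvExtract]
    simp only [List.map_cons]
    exact congrArg _ ih

theorem pvExtract_perm (l : List (Int × String)) : (pvExtract l).Perm l := by
  induction l using pvExtract.induct with
  | case1 => simp [pvExtract]
  | case2 h t m ih =>
    rw [pvExtract]
    exact ((ih.cons _).trans (List.perm_cons_erase (pvQMin_mem_cons h t)).symm)

theorem pvQMin_le (a : Int × String) (l : List (Int × String)) :
    ∀ y ∈ a :: l, toLex (pvQMin a l) ≤ toLex y := by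
  induction l generalizing a with
  | nil =>
    intro y hy
    simp only [List.mem_singleton] at hy
    subst hy; simp [pvQMin]
  | cons h t ih =>
    have step : pvQMin a (h :: t) = pvQMin (if pvLexLt h a then h else a) t := by
      by_cases hlt : pvLexLt h a = true
      · simp [pvQMin, hlt]
      · simp only [Bool.not_eq_true] at hlt
        simp [pvQMin, hlt]
    intro y hy
    rw [step]
    have hml : toLex (if pvLexLt h a then h else a) ≤ toLex a ∧
        toLex (if pvLexLt h a then h else a) ≤ toLex h := by
      by_cases hlt : pvLexLt h a = true
      · rw [if_pos hlt]
        have hha : toLex h < toLex a := by simpa [pvLexLt] using hlt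
        exact ⟨le_of_lt hha, le_refl _⟩
      · rw [if_neg hlt]
        have hah : toLex a ≤ toLex h := by
          simp only [pvLexLt, decide_eq_true_eq] at hlt
          exact not_lt.mp hlt
        exact ⟨le_refl _, hah⟩
    have base := ih (if pvLexLt h a then h else a)
    have hself := base _ (List.mem_cons_self ..)
    rcases List.mem_cons.mp hy with rfl | hy2
    · exact le_trans hself hml.1
    · rcases List.mem_cons.mp hy2 with rfl | hy3
      · exact le_trans hself hml.2
      · exact base _ (List.mem_cons_of_mem _ hy3)

theorem pvExtract_pairwise (l : List (Int × String)) :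
    (pvExtract l).Pairwise (fun x y => toLex x ≤ toLex y) := by
  induction l using pvExtract.induct with
  | case1 => simp [pvExtract]
  | case2 h t m ih =>
    rw [pvExtract]
    refine List.Pairwise.cons ?_ ih
    intro b hb
    have hb' : b ∈ (h :: t).erase (pvQMin h t) :=
      (pvExtract_perm _).mem_iff.mp hb
    exact pvQMin_le h t b (List.mem_of_mem_erase hb')

theorem pvInsertFold_congr (f g : (Int × String) → (Int × String) → Bool)
    (h : ∀ a b, f a b = g a b) (xs acc : List (Int × String)) :
    xs.foldl (fun acc x => PySem.List.insertBy f x acc) acc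
      = xs.foldl (fun acc x => PySem.List.insertBy g x acc) acc := by
  have hfg : f = g := by funext a b; exact h a b
  rw [hfg]

theorem pvSorted2_eq_sorted (xs : List (Int × String)) :
    PySem.List.sorted2 xs (fun t => t.1) (fun t => t.2)
      = PySem.List.sorted xs (fun t => toLex t) := by
  rw [PySem.List.sorted_eq_foldl_insertBy]
  show List.foldl (fun acc x => PySem.List.insertBy
      (fun a b => decide (a.1 < b.1) || (!decide (b.1 < a.1) && decide (a.2 < b.2))) x acc) [] xs
    = List.foldl (fun acc x => PySem.List.insertBy
      (fun a b => decide (toLex a < toLex b)) x acc) [] xs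
  refine pvInsertFold_congr _ _ (fun a b => ?_) xs []
  rcases lt_trichotomy a.1 b.1 with h | h | h
  · simp [h, Prod.Lex.lt_iff]
  · simp [h, Prod.Lex.lt_iff]
  · have h1 : ¬ a.1 < b.1 := by omega
    have h2 : ¬ a.1 = b.1 := by omega
    simp [h, h1, h2, Prod.Lex.lt_iff]

theorem pvExtract_eq_sorted (l : List (Int × String)) :
    pvExtract l = PySem.List.sorted l (fun t => toLex t) := by
  exact PySem.List.eq_of_perm_of_pairwise_le_of_injective
    (fun t => toLex t) (fun a b hab => toLex.injective hab)
    ((pvExtract_perm l).trans (PySem.List.sorted_perm l (fun t => toLex t) false).symm)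
    (pvExtract_pairwise l)
    (PySem.List.sorted_pairwise l (fun t => toLex t))

-- ===== VERDICT (by name: the statement is the Claim_ definition above) =====
theorem prioritize_orders_spec : Claim_equal_prioritize_orders := by
  intro orders _
  unfold Spec_prioritize_orders prioritize_orders prioritize_orders_alt
  rw [pvDrain_eq_map, pvExtract_eq_sorted]
  simp only [pvSorted2_eq_sorted]
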